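-- pv_equiv track=rewrite | github.com/xtrasmal/sqlit | sqlit/domains/query/app/multi_statement.py | _split_by_blank_lines
-- ===== SOURCE A (Python) =====
-- from typing import TYPE_CHECKING, Any, Iterator
--
-- def _iter_sql_chars(sql: str) -> Iterator[tuple[int, str, bool]]:
--     """Iterate through SQL characters, tracking string literal context.
--
--     Handles escape sequences (backslash) and SQL-style doubled quotes.
--
--     Yields:
--         (index, char, outside_string) tuples where outside_string is True
--         when the character is not inside a string literal.
--     """
--     in_single_quote = False
--     in_double_quote = False
--     i = 0
--
--     while i < len(sql):
--         char = sql[i]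
--
--         # Handle escape sequences in strings
--         if i + 1 < len(sql) and char == "\\" and (in_single_quote or in_double_quote):
--             yield (i, char, False)
--             yield (i + 1, sql[i + 1], False)
--             i += 2
--             continue
--
--         # Handle doubled quotes (SQL escape for quotes)
--         if char == "'" and i + 1 < len(sql) and sql[i + 1] == "'" and in_single_quote:
--             yield (i, "'", False)
--             yield (i + 1, "'", False)
--             i += 2
--             continue
--         if char == '"' and i + 1 < len(sql) and sql[i + 1] == '"' and in_double_quote:
--             yield (i, '"', False)
--             yield (i + 1, '"', False)
--             i += 2
--             continue
--
--         # Toggle quote state and yield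
--         if char == "'" and not in_double_quote:
--             in_single_quote = not in_single_quote
--             yield (i, char, False)  # Quote char is part of string syntax
--         elif char == '"' and not in_single_quote:
--             in_double_quote = not in_double_quote
--             yield (i, char, False)  # Quote char is part of string syntax
--         else:
--             yield (i, char, not in_single_quote and not in_double_quote)
--
--         i += 1
--
-- def _split_by_blank_lines(sql: str) -> list[str]:
--     """Split SQL by blank lines, respecting string literals.
--
--     A blank line is defined as a line containing only whitespace.
--     This is triggered when there are no semicolons in the query.
--     """
--     statements = []
--     current: list[str] = []
--     line_start = 0
--     prev_line_empty = False
--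
--     for idx, char, outside in _iter_sql_chars(sql):
--         if char == "\n" and outside:
--             line_content = sql[line_start:idx]
--             current_line_empty = not line_content.strip()
--
--             if current_line_empty and prev_line_empty:
--                 # Consecutive blank lines, skip
--                 pass
--             elif current_line_empty and current:
--                 # Blank line after content - split here
--                 stmt = "".join(current).strip()
--                 if stmt:
--                     statements.append(stmt)
--                 current = []
--             else:
--                 # Regular newline, keep it
--                 current.append(char)
--
--             prev_line_empty = current_line_empty
--             line_start = idx + 1
--         else:
--             current.append(char)
--             if char not in " \t\n":
--                 prev_line_empty = False
--
--     # Don't forget the last statement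
--     stmt = "".join(current).strip()
--     if stmt:
--         statements.append(stmt)
--
--     return statements
-- ===== SOURCE B (Python) =====
-- def _cut_segments(sql: str) -> list[str]:
--     """Cut sql into logical-line segments at newlines occurring outside string
--     literals (inside-string newlines stay in the segment text)."""
--     segs = []
--     seg = []
--     in_s = in_d = False
--     i = 0
--     n = len(sql)
--     while i < n:
--         c = sql[i]
--         if c == "\\" and (in_s or in_d) and i + 1 < n:
--             seg.append(c)
--             seg.append(sql[i + 1])
--             i += 2
--             continue
--         if in_s and c == "'" and i + 1 < n and sql[i + 1] == "'":
--             seg.append("''")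
--             i += 2
--             continue
--         if in_d and c == '"' and i + 1 < n and sql[i + 1] == '"':
--             seg.append('""')
--             i += 2
--             continue
--         if c == "'" and not in_d:
--             in_s = not in_s
--         elif c == '"' and not in_s:
--             in_d = not in_d
--         elif c == "\n" and not in_s and not in_d:
--             segs.append("".join(seg))
--             seg = []
--             i += 1
--             continue
--         seg.append(c)
--         i += 1
--     segs.append("".join(seg))
--     return segs
--
--
-- def _split_by_blank_lines(sql: str) -> list[str]:
--     """Split SQL by blank lines, respecting string literals."""
--     segs = _cut_segments(sql)
--     statements = []
--     cur = ""
--     prev_blank = False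
--     for seg in segs[:-1]:
--         blank = not seg.strip()
--         if blank and prev_blank:
--             cur += seg
--         elif blank and (cur or seg):
--             stmt = (cur + seg).strip()
--             if stmt:
--                 statements.append(stmt)
--             cur = ""
--         else:
--             cur += seg + "\n"
--         prev_blank = blank
--     stmt = (cur + segs[-1]).strip()
--     if stmt:
--         statements.append(stmt)
--     return statements
-- ===== Notes on version B (the rewrite author's own statement) =====
-- stated objective: alternative
-- what changed: Replaces A's per-character generator (index/char/outside triples consumed by one stateful loop that slices sql[line_start:idx] to test blankness) with a two-pass decomposition: pass one cuts sql into logical-line segments at outside-string newlines, pass two groups whole segments into statements by the blank-after-blank/blank-after-content rule.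
import Mathlib
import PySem

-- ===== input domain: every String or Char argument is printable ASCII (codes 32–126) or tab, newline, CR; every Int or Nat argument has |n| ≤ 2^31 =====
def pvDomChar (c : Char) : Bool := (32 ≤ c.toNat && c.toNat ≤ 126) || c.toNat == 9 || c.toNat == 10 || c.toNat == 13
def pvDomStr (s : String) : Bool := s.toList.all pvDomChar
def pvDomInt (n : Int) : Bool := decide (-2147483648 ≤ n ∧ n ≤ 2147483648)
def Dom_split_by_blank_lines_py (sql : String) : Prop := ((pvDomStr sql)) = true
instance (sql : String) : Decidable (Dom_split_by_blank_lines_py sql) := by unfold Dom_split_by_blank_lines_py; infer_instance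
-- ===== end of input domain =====

-- B replaces A's per-character generator (index/char/outside triples consumed by a
-- stateful loop that re-slices sql to test line blankness) by a two-pass decomposition:
-- cut into logical-line segments at outside-string newlines, then group segments.

-- ===== PORT A =====
-- _iter_sql_chars: yields (index, char, outside_string) triples; the while-loop
-- with i += 1 / i += 2 becomes recursion on the remaining characters.
def iterGo : List Char → Int → Bool → Bool → List (Int × Char × Bool)
  | [], _, _, _ => []
  | [c], i, sq, dq =>
    -- i + 1 < len(sql) fails: the two-character branches cannot fire
    if c == '\'' && !dq then [(i, c, false)]
    else if c == '"' && !sq then [(i, c, false)]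
    else [(i, c, !sq && !dq)]
  | c :: c2 :: rest, i, sq, dq =>
    if c == '\\' && (sq || dq) then
      (i, c, false) :: (i + 1, c2, false) :: iterGo rest (i + 2) sq dq
    else if c == '\'' && c2 == '\'' && sq then
      (i, '\'', false) :: (i + 1, '\'', false) :: iterGo rest (i + 2) sq dq
    else if c == '"' && c2 == '"' && dq then
      (i, '"', false) :: (i + 1, '"', false) :: iterGo rest (i + 2) sq dq
    else if c == '\'' && !dq then
      (i, c, false) :: iterGo (c2 :: rest) (i + 1) (!sq) dq
    else if c == '"' && !sq then
      (i, c, false) :: iterGo (c2 :: rest) (i + 1) sq (!dq)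
    else
      (i, c, !sq && !dq) :: iterGo (c2 :: rest) (i + 1) sq dq

-- the body of A's `for idx, char, outside in _iter_sql_chars(sql)` loop;
-- state = (statements, current, line_start, prev_line_empty)
def stepA (sql : List Char) (st : List String × List Char × Int × Bool)
    (t : Int × Char × Bool) : List String × List Char × Int × Bool :=
  match st, t with
  | (stmts, current, line_start, prev), (idx, char, outside) =>
    if char == '\n' && outside then
      let line_content := PySem.List.slice sql (some line_start) (some idx)
      let current_line_empty := (PySem.Chars.strip line_content).isEmpty
      if current_line_empty && prev then
        (stmts, current, idx + 1, current_line_empty)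
      else if current_line_empty && !current.isEmpty then
        let stmt := PySem.Chars.strip current
        ((if !stmt.isEmpty then stmts ++ [String.mk stmt] else stmts), [],
          idx + 1, current_line_empty)
      else
        (stmts, current ++ [char], idx + 1, current_line_empty)
    else
      (stmts, current ++ [char], line_start,
        if [' ', '\t', '\n'].contains char then prev else false)

def split_by_blank_lines_py (sql : String) : List String :=
  let cs := sql.toList
  let st := (iterGo cs 0 false false).foldl (stepA cs) ([], [], (0 : Int), false)
  let stmt := PySem.Chars.strip st.2.1
  if !stmt.isEmpty then st.1 ++ [String.mk stmt] else st.1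

-- ===== PORT B =====
-- pass 1 (_cut_segments): cut sql into logical-line segments at outside-string newlines
def segsGo : List Char → Bool → Bool → List Char → List (List Char)
  | [], _, _, seg => [seg]
  | [c], sq, dq, seg =>
    -- i + 1 < n fails: the two-character branches cannot fire
    if c == '\'' && !dq then segsGo [] (!sq) dq (seg ++ [c])
    else if c == '"' && !sq then segsGo [] sq (!dq) (seg ++ [c])
    else if c == '\n' && (!sq && !dq) then seg :: segsGo [] sq dq []
    else segsGo [] sq dq (seg ++ [c])
  | c :: c2 :: rest, sq, dq, seg =>
    if c == '\\' && (sq || dq) then segsGo rest sq dq (seg ++ [c, c2])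
    else if sq && c == '\'' && c2 == '\'' then segsGo rest sq dq (seg ++ ['\'', '\''])
    else if dq && c == '"' && c2 == '"' then segsGo rest sq dq (seg ++ ['"', '"'])
    else if c == '\'' && !dq then segsGo (c2 :: rest) (!sq) dq (seg ++ [c])
    else if c == '"' && !sq then segsGo (c2 :: rest) sq (!dq) (seg ++ [c])
    else if c == '\n' && (!sq && !dq) then seg :: segsGo (c2 :: rest) sq dq []
    else segsGo (c2 :: rest) sq dq (seg ++ [c])

-- pass 2: group segments into statements (last segment is flushed separately)
def groupGo : List (List Char) → List String → List Char → Bool → List String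
  | [], stmts, _, _ => stmts
  | [last], stmts, cur, _ =>
    let stmt := PySem.Chars.strip (cur ++ last)
    if !stmt.isEmpty then stmts ++ [String.mk stmt] else stmts
  | seg :: s2 :: rest, stmts, cur, prev =>
    let blank := (PySem.Chars.strip seg).isEmpty
    if blank && prev then
      groupGo (s2 :: rest) stmts (cur ++ seg) blank
    else if blank && !(cur ++ seg).isEmpty then
      let stmt := PySem.Chars.strip (cur ++ seg)
      groupGo (s2 :: rest)
        (if !stmt.isEmpty then stmts ++ [String.mk stmt] else stmts) [] blank
    else
      groupGo (s2 :: rest) stmts (cur ++ seg ++ ['\n']) blank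

def split_by_blank_lines_py_alt (sql : String) : List String :=
  groupGo (segsGo sql.toList false false []) [] [] false

-- ===== PRECONDITION & SPEC =====
def Spec_split_by_blank_lines_py (sql : String) (out : List String) : Prop := out = split_by_blank_lines_py_alt sql
instance (sql : String) (out : List String) : Decidable (Spec_split_by_blank_lines_py sql out) := by unfold Spec_split_by_blank_lines_py; infer_instance

-- ===== CLAIM (what is proved, stated in full; the proofs are below) =====
def Claim_equal_split_by_blank_lines_py : Prop := ∀ (sql : String), Dom_split_by_blank_lines_py sql → Spec_split_by_blank_lines_py sql (split_by_blank_lines_py sql)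

-- ===== LEMMAS AND PROOFS =====

-- prev_line_empty update of A's else branch
def pvKeep (c : Char) (p : Bool) : Bool := if [' ', '\t', '\n'].contains c then p else false

-- A's loop fused with its generator, slice-free: the current line's characters
-- (`la`) are accumulated instead of recomputed by slicing
def Gfun : List Char → Bool → Bool → List Char → List String → List Char → Bool → List String
  | [], _, _, _, stmts, cur, _ =>
    let stmt := PySem.Chars.strip cur
    if !stmt.isEmpty then stmts ++ [String.mk stmt] else stmts
  | [c], sq, dq, la, stmts, cur, prev =>
    if c == '\'' && !dq then Gfun [] (!sq) dq (la ++ [c]) stmts (cur ++ [c]) (pvKeep c prev)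
    else if c == '"' && !sq then Gfun [] sq (!dq) (la ++ [c]) stmts (cur ++ [c]) (pvKeep c prev)
    else if c == '\n' && (!sq && !dq) then
      let blank := (PySem.Chars.strip la).isEmpty
      if blank && prev then Gfun [] sq dq [] stmts cur blank
      else if blank && !cur.isEmpty then
        let stmt := PySem.Chars.strip cur
        Gfun [] sq dq [] (if !stmt.isEmpty then stmts ++ [String.mk stmt] else stmts) [] blank
      else Gfun [] sq dq [] stmts (cur ++ [c]) blank
    else Gfun [] sq dq (la ++ [c]) stmts (cur ++ [c]) (pvKeep c prev)
  | c :: c2 :: rest, sq, dq, la, stmts, cur, prev =>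
    if c == '\\' && (sq || dq) then
      Gfun rest sq dq (la ++ [c, c2]) stmts ((cur ++ [c]) ++ [c2]) (pvKeep c2 (pvKeep c prev))
    else if c == '\'' && c2 == '\'' && sq then
      Gfun rest sq dq (la ++ ['\'', '\'']) stmts ((cur ++ ['\'']) ++ ['\'']) (pvKeep '\'' (pvKeep '\'' prev))
    else if c == '"' && c2 == '"' && dq then
      Gfun rest sq dq (la ++ ['"', '"']) stmts ((cur ++ ['"']) ++ ['"']) (pvKeep '"' (pvKeep '"' prev))
    else if c == '\'' && !dq then
      Gfun (c2 :: rest) (!sq) dq (la ++ [c]) stmts (cur ++ [c]) (pvKeep c prev)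
    else if c == '"' && !sq then
      Gfun (c2 :: rest) sq (!dq) (la ++ [c]) stmts (cur ++ [c]) (pvKeep c prev)
    else if c == '\n' && (!sq && !dq) then
      let blank := (PySem.Chars.strip la).isEmpty
      if blank && prev then Gfun (c2 :: rest) sq dq [] stmts cur blank
      else if blank && !cur.isEmpty then
        let stmt := PySem.Chars.strip cur
        Gfun (c2 :: rest) sq dq [] (if !stmt.isEmpty then stmts ++ [String.mk stmt] else stmts) [] blank
      else Gfun (c2 :: rest) sq dq [] stmts (cur ++ [c]) blank
    else Gfun (c2 :: rest) sq dq (la ++ [c]) stmts (cur ++ [c]) (pvKeep c prev)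

def pvFin (st : List String × List Char × Int × Bool) : List String :=
  let stmt := PySem.Chars.strip st.2.1
  if !stmt.isEmpty then st.1 ++ [String.mk stmt] else st.1


theorem pv_strip_eq_nil_iff (x : List Char) :
    PySem.Chars.strip x = [] ↔ ∀ c ∈ x, PySem.Chars.isspace c := by
  unfold PySem.Chars.strip PySem.Chars.rstrip PySem.Chars.lstrip
  simp only [List.reverse_eq_nil_iff, List.dropWhile_eq_nil_iff, List.mem_reverse]
  constructor
  · intro h c hc
    have hc' : c ∈ List.takeWhile PySem.Chars.isspace x ++ List.dropWhile PySem.Chars.isspace x := by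
      rw [List.takeWhile_append_dropWhile]; exact hc
    rcases List.mem_append.1 hc' with h1 | h2
    · exact List.mem_takeWhile_imp h1
    · exact h c h2
  · intro h c hc
    exact h c (List.dropWhile_subset _ hc)

theorem pv_strip_ws_prefix (w x : List Char) (hw : ∀ c ∈ w, PySem.Chars.isspace c) :
    PySem.Chars.strip (w ++ x) = PySem.Chars.strip x := by
  unfold PySem.Chars.strip PySem.Chars.lstrip
  congr 1
  rw [List.dropWhile_append]
  simp [List.dropWhile_eq_nil_iff.2 hw]



theorem pv_slice_line (pre0 la cs : List Char) :
    PySem.List.slice (pre0 ++ (la ++ cs)) (some ((pre0.length : Nat) : Int))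
      (some (((pre0.length : Nat) : Int) + ((la.length : Nat) : Int))) = la := by
  have h : ((pre0.length : Nat) : Int) + ((la.length : Nat) : Int)
      = (((pre0.length + la.length : Nat)) : Int) := by push_cast; ring
  rw [h, PySem.List.slice_natCast]
  rw [← List.append_assoc]
  simp [List.drop_left, List.take_left]

theorem pv_L1 (cs : List Char) (sq dq : Bool) (la : List Char) (stmts : List String)
    (cur : List Char) (prev : Bool) :
    ∀ (pre0 sql : List Char), sql = pre0 ++ la ++ cs →
    pvFin (List.foldl (stepA sql) (stmts, cur, ((pre0.length : Nat) : Int), prev)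
        (iterGo cs (((pre0.length + la.length : Nat) : Int)) sq dq))
      = Gfun cs sq dq la stmts cur prev := by
  induction cs, sq, dq, la, stmts, cur, prev using Gfun.induct
  case case1 sq dq la stmts cur prev stmt h =>
    intro pre0 sql hsql
    simp [iterGo, pvFin, Gfun]
  case case2 sq dq la stmts cur prev stmt h =>
    intro pre0 sql hsql
    simp [iterGo, pvFin, Gfun]
  case case3 c sq dq la stmts cur prev h ih =>
    intro pre0 sql hsql
    subst hsql
    first
    | simp [iterGo, Gfun, stepA, pvFin, pvKeep, pv_slice_line, List.length_append, h]
    | (simp [iterGo, Gfun, stepA, pvFin, pvKeep, pv_slice_line, List.length_append, h]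
       exact ih pre0 _ (by simp))
  case case4 c sq dq la stmts cur prev h1 h2 ih =>
    intro pre0 sql hsql
    subst hsql
    first
    | simp [iterGo, Gfun, stepA, pvFin, pvKeep, pv_slice_line, List.length_append, h1, h2]
    | (simp [iterGo, Gfun, stepA, pvFin, pvKeep, pv_slice_line, List.length_append, h1, h2]
       exact ih pre0 _ (by simp))
  case case5 c sq dq la stmts cur prev h1 h2 h3 blank h4 ih =>
    intro pre0 sql hsql
    subst hsql
    have h4' : (((PySem.Chars.strip la).isEmpty && prev)) = true := h4
    first
    | simp [iterGo, Gfun, stepA, pvFin, pvKeep, pv_slice_line, List.length_append, h1, h2, h3, h4']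
    | (simp [iterGo, Gfun, stepA, pvFin, pvKeep, pv_slice_line, List.length_append, h1, h2, h3, h4']
       exact ih pre0 _ (by simp))
  case case6 c sq dq la stmts cur prev h1 h2 h3 blank h4 h5 stmt ih =>
    intro pre0 sql hsql
    subst hsql
    have h4' : ¬(((PySem.Chars.strip la).isEmpty && prev)) = true := h4
    have h5' : (((PySem.Chars.strip la).isEmpty && !cur.isEmpty)) = true := h5
    first
    | simp [iterGo, Gfun, stepA, pvFin, pvKeep, pv_slice_line, List.length_append, h1, h2, h3, h4', h5']
    | (simp [iterGo, Gfun, stepA, pvFin, pvKeep, pv_slice_line, List.length_append, h1, h2, h3, h4', h5']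
       exact ih pre0 _ (by simp))
  case case7 c sq dq la stmts cur prev h1 h2 h3 blank h4 h5 ih =>
    intro pre0 sql hsql
    subst hsql
    have h4' : ¬(((PySem.Chars.strip la).isEmpty && prev)) = true := h4
    have h5' : ¬(((PySem.Chars.strip la).isEmpty && !cur.isEmpty)) = true := h5
    first
    | simp [iterGo, Gfun, stepA, pvFin, pvKeep, pv_slice_line, List.length_append, h1, h2, h3, h4', h5']
    | (simp [iterGo, Gfun, stepA, pvFin, pvKeep, pv_slice_line, List.length_append, h1, h2, h3, h4', h5']
       exact ih pre0 _ (by simp))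
  case case8 c sq dq la stmts cur prev h1 h2 h3 ih =>
    intro pre0 sql hsql
    subst hsql
    first
    | simp [iterGo, Gfun, stepA, pvFin, pvKeep, pv_slice_line, List.length_append, h1, h2, h3]
    | (simp [iterGo, Gfun, stepA, pvFin, pvKeep, pv_slice_line, List.length_append, h1, h2, h3]
       exact ih pre0 _ (by simp))
  case case9 c c2 rest sq dq la stmts cur prev h ih =>
    intro pre0 sql hsql
    subst hsql
    simp only [List.append_assoc] at *
    simpa [iterGo, Gfun, stepA, pvFin, pvKeep, pv_slice_line, List.length_append, h] using ih pre0 _ (by simp)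
  case case10 c c2 rest sq dq la stmts cur prev h1 h2 ih =>
    intro pre0 sql hsql
    subst hsql
    have hcc := h2
    simp [Bool.and_eq_true, beq_iff_eq] at hcc
    obtain ⟨⟨rfl, rfl⟩, hsq⟩ := hcc
    simp only [List.append_assoc] at *
    simpa [iterGo, Gfun, stepA, pvFin, pvKeep, pv_slice_line, List.length_append, h1, hsq] using ih pre0 (pre0 ++ (la ++ (['\'', '\''] ++ rest))) (by simp)
  case case11 c c2 rest sq dq la stmts cur prev h1 h2 h3 ih =>
    intro pre0 sql hsql
    subst hsql
    have hcc := h3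
    simp [Bool.and_eq_true, beq_iff_eq] at hcc
    obtain ⟨⟨rfl, rfl⟩, hdq⟩ := hcc
    simp only [List.append_assoc] at *
    simpa [iterGo, Gfun, stepA, pvFin, pvKeep, pv_slice_line, List.length_append, h1, hdq] using ih pre0 (pre0 ++ (la ++ (['"', '"'] ++ rest))) (by simp)
  case case12 c c2 rest sq dq la stmts cur prev h1 h2 h3 h4 ih =>
    intro pre0 sql hsql
    subst hsql
    simp only [List.append_assoc] at *
    simpa [iterGo, Gfun, stepA, pvFin, pvKeep, pv_slice_line, List.length_append, h1, h2, h3, h4] using ih pre0 _ (by simp)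
  case case13 c c2 rest sq dq la stmts cur prev h1 h2 h3 h4 h5 ih =>
    intro pre0 sql hsql
    subst hsql
    simp only [List.append_assoc] at *
    simpa [iterGo, Gfun, stepA, pvFin, pvKeep, pv_slice_line, List.length_append, h1, h2, h3, h4, h5] using ih pre0 _ (by simp)
  case case14 c c2 rest sq dq la stmts cur prev h1 h2 h3 h4 h5 h6 blank h7 ih =>
    intro pre0 sql hsql
    subst hsql
    have h7' : (((PySem.Chars.strip la).isEmpty && prev)) = true := h7
    simpa [iterGo, Gfun, stepA, pvFin, pvKeep, pv_slice_line, List.length_append, h1, h2, h3, h4, h5, h6, h7'] using ih (pre0 ++ la ++ [c]) _ (by simp)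
  case case15 c c2 rest sq dq la stmts cur prev h1 h2 h3 h4 h5 h6 blank h7 h8 stmt ih =>
    intro pre0 sql hsql
    subst hsql
    have h7' : ¬(((PySem.Chars.strip la).isEmpty && prev)) = true := h7
    have h8' : (((PySem.Chars.strip la).isEmpty && !cur.isEmpty)) = true := h8
    simpa [iterGo, Gfun, stepA, pvFin, pvKeep, pv_slice_line, List.length_append, h1, h2, h3, h4, h5, h6, h7', h8'] using ih (pre0 ++ la ++ [c]) _ (by simp)
  case case16 c c2 rest sq dq la stmts cur prev h1 h2 h3 h4 h5 h6 blank h7 h8 ih =>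
    intro pre0 sql hsql
    subst hsql
    have h7' : ¬(((PySem.Chars.strip la).isEmpty && prev)) = true := h7
    have h8' : ¬(((PySem.Chars.strip la).isEmpty && !cur.isEmpty)) = true := h8
    simpa [iterGo, Gfun, stepA, pvFin, pvKeep, pv_slice_line, List.length_append, h1, h2, h3, h4, h5, h6, h7', h8'] using ih (pre0 ++ la ++ [c]) _ (by simp)
  case case17 c c2 rest sq dq la stmts cur prev h1 h2 h3 h4 h5 h6 ih =>
    intro pre0 sql hsql
    subst hsql
    simp only [List.append_assoc] at *
    simpa [iterGo, Gfun, stepA, pvFin, pvKeep, pv_slice_line, List.length_append, h1, h2, h3, h4, h5, h6] using ih pre0 _ (by simp)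

theorem pv_isspace_of_blank (la : List Char) (h : (PySem.Chars.strip la).isEmpty = true) :
    ∀ c ∈ la, PySem.Chars.isspace c := by
  rw [List.isEmpty_iff] at h
  exact (pv_strip_eq_nil_iff la).1 h

theorem pv_strip_nil_of (la : List Char) (h : ∀ c ∈ la, PySem.Chars.isspace c) :
    PySem.Chars.strip la = [] := (pv_strip_eq_nil_iff la).2 h

def pvWsAll (la : List Char) : Bool := la.all (fun x => [' ', '\t', '\n'].contains x)

theorem pv_wsAll_nil : pvWsAll [] = true := rfl

theorem pv_wsAll_append1 (la : List Char) (c : Char) :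
    pvWsAll (la ++ [c]) = (pvWsAll la && [' ', '\t', '\n'].contains c) := by
  simp [pvWsAll, List.all_append]

theorem pv_keep_all (c : Char) (p : Bool) (la : List Char) :
    pvKeep c (p && pvWsAll la) = (p && pvWsAll (la ++ [c])) := by
  rw [pv_wsAll_append1]
  unfold pvKeep
  cases hK : [' ', '\t', '\n'].contains c <;> simp

theorem pv_keep_all2 (c c2 : Char) (p : Bool) (la : List Char) :
    pvKeep c2 (pvKeep c (p && pvWsAll la)) = (p && pvWsAll (la ++ [c, c2])) := by
  rw [pv_keep_all, pv_keep_all]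
  simp [List.append_assoc]

theorem pv_wsAll_ne_nil (seg : List Char) (h : ¬ pvWsAll seg = true) : seg ≠ [] := by
  intro hx; subst hx; exact h pv_wsAll_nil

theorem pv_segsGo_cons : ∀ (cs : List Char) (sq dq : Bool) (seg : List Char),
    ∃ s ss, segsGo cs sq dq seg = s :: ss := by
  intro cs sq dq seg
  induction cs, sq, dq, seg using segsGo.induct <;> simp [segsGo, *]

set_option maxRecDepth 10000 in
theorem pv_bnd : ∀ (nxt : List Char) (sq dq : Bool) (seg : List Char) (stmts : List String)
    (a w : List Char) (prevB : Bool),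
    (!sq && !dq) = true →
    (∀ (stmts' : List String) (a' w' : List Char) (prevB' : Bool),
      (∀ c ∈ w', PySem.Chars.isspace c) →
      (prevB' = true → ∀ c ∈ w' ++ a', PySem.Chars.isspace c) →
      (w' ≠ [] → prevB' = true ∨ a' ≠ []) →
      Gfun nxt sq dq [] stmts' (a' ++ []) (prevB' && pvWsAll [])
        = groupGo (segsGo nxt sq dq []) stmts' (w' ++ a') prevB') →
    (∀ c ∈ w, PySem.Chars.isspace c) →
    (prevB = true → ∀ c ∈ w ++ a, PySem.Chars.isspace c) →
    (w ≠ [] → prevB = true ∨ a ≠ []) →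
    Gfun ('\n' :: nxt) sq dq seg stmts (a ++ seg) (prevB && pvWsAll seg)
      = groupGo (seg :: segsGo nxt sq dq []) stmts (w ++ a) prevB := by
  intro nxt sq dq seg stmts a w prevB hsd ih hw hInv hwB
  obtain ⟨hsq, hdq⟩ : sq = false ∧ dq = false := by
    constructor <;> (revert hsd; cases sq <;> cases dq <;> simp)
  subst hsq; subst hdq
  obtain ⟨s2, ss, hss⟩ := pv_segsGo_cons nxt false false []
  by_cases hb : (PySem.Chars.strip seg).isEmpty = true
  · have hsegws : ∀ x ∈ seg, PySem.Chars.isspace x := pv_isspace_of_blank seg hb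
    by_cases hp : prevB = true
    · subst hp
      have hWA : ∀ x ∈ w ++ a, PySem.Chars.isspace x := hInv rfl
      by_cases hall : pvWsAll seg = true
      · -- both sides skip the blank line
        have := ih stmts (a ++ seg) w true hw
          (fun _ => by
            intro x hx
            rcases List.mem_append.1 hx with h | h
            · exact hWA x (List.mem_append_left a h)
            · rcases List.mem_append.1 h with h' | h'
              · exact hWA x (List.mem_append_right w h')
              · exact hsegws x h')
          (fun _ => Or.inl rfl)
        cases nxt <;>
          simpa [Gfun, groupGo, segsGo, hb, hall, hss, pv_wsAll_nil] using this
      · -- A flushes an all-whitespace buffer (empty statement), B skips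
        have hseg_ne : seg ≠ [] := pv_wsAll_ne_nil seg hall
        have hnil : PySem.Chars.strip (a ++ seg) = [] := pv_strip_nil_of _ (by
          intro x hx
          rcases List.mem_append.1 hx with h | h
          · exact hWA x (List.mem_append_right w h)
          · exact hsegws x h)
        have := ih stmts [] (w ++ a ++ seg) true
          (by
            intro x hx
            rcases List.mem_append.1 hx with h | h
            · rcases List.mem_append.1 h with h' | h'
              · exact hw x h'
              · exact hWA x (List.mem_append_right w h')
            · exact hsegws x h)
          (fun _ => by
            intro x hx
            rcases List.mem_append.1 hx with h | h
            · rcases List.mem_append.1 h with h' | h'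
              · rcases List.mem_append.1 h' with h'' | h''
                · exact hw x h''
                · exact hWA x (List.mem_append_right w h'')
              · exact hsegws x h'
            · simp at h)
          (fun _ => Or.inl rfl)
        cases nxt <;>
          simpa [Gfun, groupGo, segsGo, hb, hall, hss, hseg_ne, hnil,
            List.isEmpty_iff, List.append_eq_nil_iff, pv_wsAll_nil] using this
    · -- prevB = false
      have hpf : prevB = false := by cases prevB <;> simp_all
      subst hpf
      by_cases hne : (a ++ seg) = []
      · -- everything empty: both sides keep the newline
        obtain ⟨ha, hs⟩ := List.append_eq_nil_iff.1 hne
        subst ha; subst hs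
        have hwnil : w = [] := by
          by_contra hx
          rcases hwB hx with h | h <;> simp_all
        subst hwnil
        have := ih stmts ['\n'] [] true (by simp)
          (fun _ => by intro x hx; simp at hx; subst hx; decide)
          (by simp)
        cases nxt <;>
          simpa [Gfun, groupGo, segsGo, hb, hss, pv_wsAll_nil] using this
      · -- both sides flush the current statement
        have hstr : PySem.Chars.strip (w ++ (a ++ seg)) = PySem.Chars.strip (a ++ seg) :=
          pv_strip_ws_prefix w (a ++ seg) hw
        have := ih (if (!(PySem.Chars.strip (a ++ seg)).isEmpty) = true then
              stmts ++ [String.mk (PySem.Chars.strip (a ++ seg))] else stmts)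
            [] [] true (by simp) (fun _ => by simp) (by simp)
        cases nxt <;>
          simpa [Gfun, groupGo, segsGo, hb, hss, hne, hstr, List.isEmpty_iff,
            pv_wsAll_nil] using this
  · -- non-blank line: both sides keep it and its newline
    have hbf : (PySem.Chars.strip seg).isEmpty = false := by
      cases h : (PySem.Chars.strip seg).isEmpty <;> simp_all
    have := ih stmts (a ++ seg ++ ['\n']) w false hw
      (fun h => by simp at h)
      (fun _ => Or.inr (by simp))
    cases nxt <;>
      simpa [Gfun, groupGo, segsGo, hbf, hss, pv_wsAll_nil] using this

theorem pv_L2 (cs : List Char) (sq dq : Bool) (la : List Char) :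
    ∀ (stmts : List String) (a w : List Char) (prevB : Bool),
    (∀ c ∈ w, PySem.Chars.isspace c) →
    (prevB = true → ∀ c ∈ w ++ a, PySem.Chars.isspace c) →
    (w ≠ [] → prevB = true ∨ a ≠ []) →
    Gfun cs sq dq la stmts (a ++ la) (prevB && pvWsAll la)
      = groupGo (segsGo cs sq dq la) stmts (w ++ a) prevB := by
  induction cs, sq, dq, la using segsGo.induct
  case case1 sq dq seg =>
    intro stmts a w prevB hw hInv hwB
    simp only [Gfun, segsGo, groupGo]
    rw [List.append_assoc, pv_strip_ws_prefix w (a ++ seg) hw]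
  case case2 c sq dq seg h ih =>
    intro stmts a w prevB hw hInv hwB
    simpa [Gfun, segsGo, h, pv_keep_all] using ih stmts a w prevB hw hInv hwB
  case case3 c sq dq seg h1 h2 ih =>
    intro stmts a w prevB hw hInv hwB
    simpa [Gfun, segsGo, h1, h2, pv_keep_all] using ih stmts a w prevB hw hInv hwB
  case case4 c sq dq seg h1 h2 h3 ih =>
    intro stmts a w prevB hw hInv hwB
    have hc : c = '\n' := by
      have := h3; simp [Bool.and_eq_true, beq_iff_eq] at this; exact this.1
    subst hc
    have hsd : (!sq && !dq) = true := by simpa using h3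
    rw [show segsGo ['\n'] sq dq seg = seg :: segsGo [] sq dq [] from by simp [segsGo, hsd]]
    exact pv_bnd [] sq dq seg stmts a w prevB hsd ih hw hInv hwB
  case case5 c sq dq seg h1 h2 h3 ih =>
    intro stmts a w prevB hw hInv hwB
    simpa [Gfun, segsGo, h1, h2, h3, pv_keep_all] using ih stmts a w prevB hw hInv hwB
  case case6 c c2 rest sq dq seg h ih =>
    intro stmts a w prevB hw hInv hwB
    simpa [Gfun, segsGo, h, pv_keep_all2] using ih stmts a w prevB hw hInv hwB
  case case7 c c2 rest sq dq seg h1 h2 ih =>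
    intro stmts a w prevB hw hInv hwB
    obtain ⟨hsq, rfl, rfl⟩ : sq = true ∧ c = '\'' ∧ c2 = '\'' := by
      have := h2; simp [Bool.and_eq_true, beq_iff_eq] at this; tauto
    simpa [Gfun, segsGo, hsq, pv_keep_all2] using ih stmts a w prevB hw hInv hwB
  case case8 c c2 rest sq dq seg h1 h2 h3 ih =>
    intro stmts a w prevB hw hInv hwB
    obtain ⟨hdq, rfl, rfl⟩ : dq = true ∧ c = '"' ∧ c2 = '"' := by
      have := h3; simp [Bool.and_eq_true, beq_iff_eq] at this; tauto
    simpa [Gfun, segsGo, hdq, pv_keep_all2] using ih stmts a w prevB hw hInv hwB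
  case case9 c c2 rest sq dq seg h1 h2 h3 h4 ih =>
    intro stmts a w prevB hw hInv hwB
    have g2 : ¬(c == '\'' && c2 == '\'' && sq) = true := by
      intro hx; apply h2; revert hx
      simp [Bool.and_eq_true, beq_iff_eq]
      tauto
    have g3 : ¬(c == '"' && c2 == '"' && dq) = true := by
      intro hx; apply h3; revert hx
      simp [Bool.and_eq_true, beq_iff_eq]
      tauto
    have e1 : (a ++ seg) ++ [c] = a ++ (seg ++ [c]) := by simp
    simp only [Gfun, segsGo]
    rw [if_neg h1, if_neg g2, if_neg g3, if_pos h4]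
    rw [if_neg h1, if_neg h2, if_neg h3, if_pos h4]
    rw [pv_keep_all, e1]
    exact ih stmts a w prevB hw hInv hwB
  case case10 c c2 rest sq dq seg h1 h2 h3 h4 h5 ih =>
    intro stmts a w prevB hw hInv hwB
    have g2 : ¬(c == '\'' && c2 == '\'' && sq) = true := by
      intro hx; apply h2; revert hx
      simp [Bool.and_eq_true, beq_iff_eq]
      tauto
    have g3 : ¬(c == '"' && c2 == '"' && dq) = true := by
      intro hx; apply h3; revert hx
      simp [Bool.and_eq_true, beq_iff_eq]
      tauto
    have e1 : (a ++ seg) ++ [c] = a ++ (seg ++ [c]) := by simp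
    simp only [Gfun, segsGo]
    rw [if_neg h1, if_neg g2, if_neg g3, if_neg h4, if_pos h5]
    rw [if_neg h1, if_neg h2, if_neg h3, if_neg h4, if_pos h5]
    rw [pv_keep_all, e1]
    exact ih stmts a w prevB hw hInv hwB
  case case11 c c2 rest sq dq seg h1 h2 h3 h4 h5 h6 ih =>
    intro stmts a w prevB hw hInv hwB
    have hc : c = '\n' := by
      have := h6; simp [Bool.and_eq_true, beq_iff_eq] at this; exact this.1
    subst hc
    have hsd : (!sq && !dq) = true := by simpa using h6
    rw [show segsGo ('\n' :: c2 :: rest) sq dq seg = seg :: segsGo (c2 :: rest) sq dq []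
      from by simp [segsGo, hsd]]
    exact pv_bnd (c2 :: rest) sq dq seg stmts a w prevB hsd ih hw hInv hwB
  case case12 c c2 rest sq dq seg h1 h2 h3 h4 h5 h6 ih =>
    intro stmts a w prevB hw hInv hwB
    have g2 : ¬(c == '\'' && c2 == '\'' && sq) = true := by
      intro hx; apply h2
      simp [Bool.and_eq_true, beq_iff_eq] at hx ⊢
      tauto
    have g3 : ¬(c == '"' && c2 == '"' && dq) = true := by
      intro hx; apply h3
      simp [Bool.and_eq_true, beq_iff_eq] at hx ⊢
      tauto
    simpa [Gfun, segsGo, h1, h2, h3, g2, g3, h4, h5, h6, pv_keep_all] using ih stmts a w prevB hw hInv hwB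

-- ===== VERDICT (by name: the statement is the Claim_ definition above) =====
theorem split_by_blank_lines_py_spec : Claim_equal_split_by_blank_lines_py := by
  intro sql _
  unfold Spec_split_by_blank_lines_py split_by_blank_lines_py split_by_blank_lines_py_alt
  have h1 := pv_L1 sql.toList false false [] [] [] false [] sql.toList (by simp)
  have h2 := pv_L2 sql.toList false false [] [] [] [] false (by simp) (by simp) (by simp)
  simp only [List.length_nil, List.nil_append, List.append_nil, Nat.add_zero, Nat.cast_zero,
    Bool.false_and] at h1 h2
  simp only [pvFin] at h1
  rw [← h2, ← h1]
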